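-- pv_equiv track=rewrite | github.com/wael-daaboul/L10n-Audit-Toolkit | l10n_audit/reports/report_aggregator.py | build_source_status
-- ===== SOURCE A (Python) =====
-- from collections import Counter
-- from typing import Any
--
-- HIDDEN_WHEN_EMPTY = {"placeholders", "icu_message_audit"}
--
-- def build_source_status(reports: dict[str, Any], issues: list[dict[str, Any]]) -> dict[str, str]:
--     counts = Counter(str(issue["source"]) for issue in issues)
--     status: dict[str, str] = {}
--     for source in sorted(reports):
--         if source in HIDDEN_WHEN_EMPTY and counts.get(source, 0) == 0:
--             status[source] = "passed"
--         else:
--             status[source] = f"{counts.get(source, 0)} issues"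
--     return status
-- ===== SOURCE B (Python) =====
-- HIDDEN_WHEN_EMPTY = {"placeholders", "icu_message_audit"}
--
-- def build_source_status(reports, issues):
--     # Merge-join of two sorted sequences: sort the issue sources once, then walk the
--     # sorted report keys with a single advancing pointer, counting each key's run.
--     sources = sorted(str(issue["source"]) for issue in issues)
--     n = len(sources)
--     i = 0
--     status = {}
--     for source in sorted(reports):
--         while i < n and sources[i] < source:
--             i += 1
--         count = 0
--         while i < n and sources[i] == source:
--             count += 1
--             i += 1
--         if source in HIDDEN_WHEN_EMPTY and count == 0:
--             status[source] = "passed"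
--         else:
--             status[source] = f"{count} issues"
--     return status
-- ===== Notes on version B (the rewrite author's own statement) =====
-- stated objective: alternative
-- what changed: Replaces A's Counter hash-count plus per-key lookup with a merge-join: the issue sources are sorted once and a single pointer advances through them while walking the sorted report keys, counting each key's run in place.
import Mathlib
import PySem

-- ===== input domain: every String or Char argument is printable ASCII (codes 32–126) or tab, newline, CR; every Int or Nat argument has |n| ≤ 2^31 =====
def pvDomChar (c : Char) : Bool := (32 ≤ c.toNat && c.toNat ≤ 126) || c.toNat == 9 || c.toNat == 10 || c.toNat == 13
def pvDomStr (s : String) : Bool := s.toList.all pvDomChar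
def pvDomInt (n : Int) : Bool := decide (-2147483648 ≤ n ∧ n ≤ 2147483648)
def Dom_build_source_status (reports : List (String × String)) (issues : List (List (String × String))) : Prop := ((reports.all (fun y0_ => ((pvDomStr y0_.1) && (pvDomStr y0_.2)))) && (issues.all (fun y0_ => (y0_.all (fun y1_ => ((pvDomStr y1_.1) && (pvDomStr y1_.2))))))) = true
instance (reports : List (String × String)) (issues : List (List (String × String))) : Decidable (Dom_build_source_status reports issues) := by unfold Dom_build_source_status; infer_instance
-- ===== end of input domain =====

-- B replaces A's Counter-plus-lookup with a merge-join: sort the issue sources once, then walk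
-- the sorted report keys with one advancing pointer, counting each key's run (objective: alternative).

-- ===== PORT A =====
def HIDDEN_WHEN_EMPTY : PySem.Set String := PySem.Set.ofList ["placeholders", "icu_message_audit"]

-- str(issue["source"]): the value is already a string under the type convention, so str() is the
-- identity; the getD default "" is never reached inside Pre_ (every issue has a "source" key).
def pvSrc (issue : List (String × String)) : String :=
  (PySem.Dict.ofList issue).getD "source" ""

def build_source_status (reports : List (String × String)) (issues : List (List (String × String))) : List (String × String) :=
  let counts : PySem.Dict String Int := PySem.Dict.counter (issues.map pvSrc)
  let keys := PySem.List.sorted (PySem.List.dedup (reports.map Prod.fst)) (fun x => x) false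
  (keys.foldl (fun st source =>
      if PySem.Set.contains HIDDEN_WHEN_EMPTY source && (counts.getD source 0 == 0) then
        st.insert source "passed"
      else
        st.insert source (PySem.Int.toStr (counts.getD source 0) ++ " issues"))
    PySem.Dict.empty).items

-- ===== PORT B =====
-- `while i < n and sources[i] < source: i += 1`
def pvSkipLt (source : String) : List String → List String
  | [] => []
  | x :: xs => if x < source then pvSkipLt source xs else x :: xs

-- `count = 0; while i < n and sources[i] == source: count += 1; i += 1`
def pvCountEq (source : String) : List String → Nat × List String
  | [] => (0, [])
  | x :: xs =>
      if x == source then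
        let p := pvCountEq source xs
        (p.1 + 1, p.2)
      else (0, x :: xs)

-- the for-loop over the sorted keys, carrying the pointer position as the remaining sources
def pvMerge (sources : List String) : List String → List (String × String)
  | [] => []
  | k :: ks =>
      let rest := pvSkipLt k sources
      let p := pvCountEq k rest
      let lab := if PySem.Set.contains HIDDEN_WHEN_EMPTY k && ((p.1 : Int) == 0) then "passed"
                 else PySem.Int.toStr (p.1 : Int) ++ " issues"
      (k, lab) :: pvMerge p.2 ks

def build_source_status_alt (reports : List (String × String)) (issues : List (List (String × String))) : List (String × String) :=
  pvMerge (PySem.List.sorted (issues.map pvSrc) (fun x => x) false)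
          (PySem.List.sorted (PySem.List.dedup (reports.map Prod.fst)) (fun x => x) false)

-- ===== PRECONDITION & SPEC =====
-- Pre_ excludes issues without a "source" key, on which A raises KeyError.
def Pre_build_source_status (reports : List (String × String)) (issues : List (List (String × String))) : Prop :=
  (issues.all (fun issue => issue.any (fun p => p.1 == "source"))) = true
instance (reports : List (String × String)) (issues : List (List (String × String))) : Decidable (Pre_build_source_status reports issues) := by unfold Pre_build_source_status; infer_instance

def pvWitness_build_source_status : (List (String × String)) × (List (List (String × String))) :=
  ([("placeholders", "x"), ("parity", "y")], [[("source", "parity")]])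

def Spec_build_source_status (reports : List (String × String)) (issues : List (List (String × String))) (out : List (String × String)) : Prop := out = build_source_status_alt reports issues
instance (reports : List (String × String)) (issues : List (List (String × String))) (out : List (String × String)) : Decidable (Spec_build_source_status reports issues out) := by unfold Spec_build_source_status; infer_instance

-- ===== CLAIM (what is proved, stated in full; the proofs are below) =====
def Claim_equal_build_source_status : Prop := ∀ (reports : List (String × String)) (issues : List (List (String × String))), Dom_build_source_status reports issues → Pre_build_source_status reports issues → Spec_build_source_status reports issues (build_source_status reports issues)

-- ===== LEMMAS AND PROOFS =====

-- the label both programs attach to a key whose issue count is c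
def pvLabelOf (c : Int) (k : String) : String :=
  if PySem.Set.contains HIDDEN_WHEN_EMPTY k && (c == 0) then "passed"
  else PySem.Int.toStr c ++ " issues"

theorem skipLt_eq_dropWhile (k : String) (l : List String) :
    pvSkipLt k l = l.dropWhile (fun x => decide (x < k)) := by
  induction l with
  | nil => rfl
  | cons x xs ih =>
    simp only [pvSkipLt, List.dropWhile]
    by_cases h : x < k <;> simp [h, ih]

theorem countEq_eq (k : String) (l : List String) :
    pvCountEq k l = ((l.takeWhile (fun x => x == k)).length, l.dropWhile (fun x => x == k)) := by
  induction l with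
  | nil => rfl
  | cons x xs ih =>
    by_cases h : x = k <;>
      simp [pvCountEq, h, ih]

theorem count_eq_zero_of_forall_ne (k : String) (l : List String) (h : ∀ x ∈ l, x ≠ k) :
    l.count k = 0 :=
  List.count_eq_zero.mpr (fun hk => h k hk rfl)

theorem count_takeWhile_lt_zero (k k' : String) (l : List String) (h : k ≤ k') :
    (l.takeWhile (fun x => decide (x < k))).count k' = 0 :=
  count_eq_zero_of_forall_ne _ _ (fun x hx =>
    ne_of_lt (lt_of_lt_of_le (by simpa using List.mem_takeWhile_imp hx) h))

theorem count_takeWhile_eq_zero (k k' : String) (l : List String) (h : k < k') :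
    (l.takeWhile (fun x => x == k)).count k' = 0 :=
  count_eq_zero_of_forall_ne _ _ (fun x hx => by
    have hxk : x = k := by simpa using List.mem_takeWhile_imp hx
    exact hxk ▸ ne_of_lt h)

-- after skipping the strict-lower prefix of a sorted list, everything left is ≥ k
theorem ge_of_dropWhile_lt (k : String) (l : List String) (hs : l.Pairwise (· ≤ ·)) :
    ∀ x ∈ l.dropWhile (fun x => decide (x < k)), k ≤ x := by
  induction l with
  | nil => intro x hx; simp at hx
  | cons y ys ih =>
    intro x hx
    by_cases hy : y < k
    · rw [List.dropWhile_cons_of_pos (by simpa using hy)] at hx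
      exact ih (hs.sublist (List.sublist_cons_self y ys)) x hx
    · rw [List.dropWhile_cons_of_neg (by simpa using hy)] at hx
      rcases List.mem_cons.mp hx with h | h
      · exact h ▸ le_of_not_gt hy
      · exact le_trans (le_of_not_gt hy) (List.rel_of_pairwise_cons hs h)

-- on a sorted list whose elements are all ≥ k, the equal run at the head is the whole count of k
theorem run_length_eq_count (k : String) (l : List String) (hs : l.Pairwise (· ≤ ·))
    (hge : ∀ x ∈ l, k ≤ x) : (l.takeWhile (fun x => x == k)).length = l.count k := by
  induction l with
  | nil => rfl
  | cons y ys ih =>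
    by_cases h : y = k
    · subst h
      rw [List.takeWhile_cons_of_pos (by simp), List.count_cons_self, List.length_cons,
        ih (hs.sublist (List.sublist_cons_self y ys)) (fun x hx => hge x (List.mem_cons_of_mem y hx))]
    · have hyk : k < y := lt_of_le_of_ne (hge y (List.mem_cons_self ..)) (Ne.symm h)
      have hzero : (y :: ys).count k = 0 :=
        count_eq_zero_of_forall_ne _ _ (fun x hx => by
          rcases List.mem_cons.mp hx with h1 | h1
          · exact h1 ▸ h
          · exact ne_of_gt (lt_of_lt_of_le hyk (List.rel_of_pairwise_cons hs h1)))
      rw [List.takeWhile_cons_of_neg (by simpa using h), hzero]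
      rfl

-- Correctness of the merge-join: on a sorted source list and strictly increasing keys,
-- each step counts exactly the occurrences of its key in the whole source list.
theorem merge_eq (keys : List String) : ∀ (sources : List String),
    sources.Pairwise (· ≤ ·) → keys.Pairwise (· < ·) →
    pvMerge sources keys = keys.map (fun k => (k, pvLabelOf (sources.count k) k)) := by
  induction keys with
  | nil => intro sources _ _; rfl
  | cons k ks ih =>
    intro sources hs hk
    have hklt : ∀ k' ∈ ks, k < k' := fun k' h => List.rel_of_pairwise_cons hk h
    set rest := sources.dropWhile (fun x => decide (x < k)) with hrestdef
    have hcount_rest : ∀ k', k ≤ k' → sources.count k' = rest.count k' := by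
      intro k' hkk'
      have hsplit : sources.count k'
          = (sources.takeWhile (fun x => decide (x < k))).count k' + rest.count k' := by
        conv_lhs => rw [← List.takeWhile_append_dropWhile (p := fun x => decide (x < k)) (l := sources)]
        rw [List.count_append]
      rw [hsplit, count_takeWhile_lt_zero k k' sources hkk', Nat.zero_add]
    have hrest_sorted : rest.Pairwise (· ≤ ·) := hs.sublist (List.dropWhile_sublist _)
    have hrest_ge : ∀ x ∈ rest, k ≤ x := ge_of_dropWhile_lt k sources hs
    have hrun : (rest.takeWhile (fun x => x == k)).length = rest.count k :=
      run_length_eq_count k rest hrest_sorted hrest_ge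
    have hrem_count : ∀ k', k < k' →
        (rest.dropWhile (fun x => x == k)).count k' = rest.count k' := by
      intro k' hkk'
      have hsplit : rest.count k'
          = (rest.takeWhile (fun x => x == k)).count k'
            + (rest.dropWhile (fun x => x == k)).count k' := by
        conv_lhs => rw [← List.takeWhile_append_dropWhile (p := fun x => x == k) (l := rest)]
        rw [List.count_append]
      rw [hsplit, count_takeWhile_eq_zero k k' rest hkk', Nat.zero_add]
    have hrem_sorted : (rest.dropWhile (fun x => x == k)).Pairwise (· ≤ ·) :=
      hrest_sorted.sublist (List.dropWhile_sublist _)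
    have hks : ks.Pairwise (· < ·) := hk.sublist (List.sublist_cons_self k ks)
    simp only [pvMerge, skipLt_eq_dropWhile, ← hrestdef, countEq_eq, List.map_cons]
    rw [ih _ hrem_sorted hks]
    refine congrArg₂ _ ?_ ?_
    · rw [hrun, ← hcount_rest k le_rfl]
      rfl
    · apply List.map_congr_left
      intro k' hk'
      rw [hrem_count k' (hklt k' hk'), ← hcount_rest k' (le_of_lt (hklt k' hk'))]

-- A's insert-per-key loop over the Nodup sorted keys, starting from the empty dict, appends one
-- item per key: its items list is exactly a map over the keys.
theorem items_fold_insert_label (keys : List String) (f : String → String) (h : keys.Nodup) :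
    (keys.foldl (fun st source => PySem.Dict.insert st source (f source))
      (PySem.Dict.empty : PySem.Dict String String)).items
      = keys.map (fun source => (source, f source)) := by
  have := PySem.Dict.items_foldl_insert_fresh (l := keys) (k := fun s => s) (v := f)
    (d := (PySem.Dict.empty : PySem.Dict String String))
    (by intro a _; simp [PySem.Dict.contains_empty]) (by simpa using h)
  simpa using this

theorem sorted_dedup_nodup (xs : List String) :
    (PySem.List.sorted (PySem.List.dedup xs) (fun x => x) false).Nodup := by
  have hperm : (PySem.List.sorted (PySem.List.dedup xs) (fun x => x) false).Perm
      (PySem.List.dedup xs) := PySem.List.sorted_perm _ _ _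
  exact hperm.nodup_iff.mpr (PySem.List.nodup_dedup xs)

-- ===== VERDICT (by name: the statement is the Claim_ definition above) =====
theorem build_source_status_spec : Claim_equal_build_source_status := by
  intro reports issues _ _
  unfold Spec_build_source_status build_source_status build_source_status_alt
  simp only []
  set keys := PySem.List.sorted (PySem.List.dedup (reports.map Prod.fst)) (fun x => x) false with hkeys
  set src := issues.map pvSrc with hsrc
  -- keys are strictly increasing: sorted (≤) and Nodup
  have hknodup : keys.Nodup := sorted_dedup_nodup _
  have hkle : keys.Pairwise (· ≤ ·) := by
    simpa using PySem.List.sorted_pairwise (PySem.List.dedup (reports.map Prod.fst)) (fun x => x)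
  have hklt : keys.Pairwise (· < ·) :=
    (hkle.and hknodup).imp (fun h => lt_of_le_of_ne h.1 h.2)
  have hssorted : (PySem.List.sorted src (fun x => x) false).Pairwise (· ≤ ·) := by
    simpa using PySem.List.sorted_pairwise src (fun x => x)
  have hsperm : (PySem.List.sorted src (fun x => x) false).Perm src :=
    PySem.List.sorted_perm _ _ _
  rw [merge_eq keys _ hssorted hklt]
  -- A's fold builds exactly the same map
  have hfun :
      (fun (st : PySem.Dict String String) source =>
        if PySem.Set.contains HIDDEN_WHEN_EMPTY source &&
            ((PySem.Dict.counter src).getD source 0 == 0) then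
          st.insert source "passed"
        else
          st.insert source (PySem.Int.toStr ((PySem.Dict.counter src).getD source 0) ++ " issues"))
      = (fun (st : PySem.Dict String String) source =>
          st.insert source (pvLabelOf ((PySem.List.sorted src (fun x => x) false).count source) source)) := by
    funext st source
    have hc : (PySem.Dict.counter src).getD source 0
        = (((PySem.List.sorted src (fun x => x) false).count source : Nat) : Int) := by
      rw [PySem.Dict.getD_counter, hsperm.count_eq]
    rw [hc]
    unfold pvLabelOf
    split <;> rfl
  rw [hfun, items_fold_insert_label _ _ hknodup]
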